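-- pv_equiv track=rewrite | github.com/Akkisdiary/e-comm-scraper | bots/amazoncom/search.py | clean_and_transform
-- ===== SOURCE A (Python) =====
-- from typing import Dict, List
--
-- def clean_and_transform(data: List[Dict[str, str]]):
--     df = {
--         "title": [],
--         "price": [],
--         "list_price": [],
--         "url": [],
--     }
--
--     for r in data:
--         url = r.get("url")
--         title = r.get("title")
--         price = r.get("price")
--         list_price = r.get("list_price")
--
--         if all((url, title)):
--             if not url.startswith("http"):
--                 url = f"https://www.amazon.com{url}"
--
--             df["title"].append(title)
--             df["url"].append(url)
--             df["price"].append(price)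
--             df["list_price"].append(list_price)
--
--     return df
-- ===== SOURCE B (Python) =====
-- def _row(r):
--     url, title = r.get("url"), r.get("title")
--     if not all((url, title)):
--         return None
--     if not url.startswith("http"):
--         url = "https://www.amazon.com" + url
--     return (title, r.get("price"), r.get("list_price"), url)
--
--
-- def clean_and_transform(data):
--     rows = [row for row in map(_row, data) if row is not None]
--     return {
--         "title": [t for t, _, _, _ in rows],
--         "price": [p for _, p, _, _ in rows],
--         "list_price": [lp for _, _, lp, _ in rows],
--         "url": [u for _, _, _, u in rows],
--     }
-- ===== Notes on version B (the rewrite author's own statement) =====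
-- stated objective: alternative
-- what changed: A builds the four columns in one combined loop that appends to each per record; B first materializes the accepted rows (url normalized in that filter stage) in one filtering pass and then extracts each column in four separate passes.
import Mathlib
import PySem

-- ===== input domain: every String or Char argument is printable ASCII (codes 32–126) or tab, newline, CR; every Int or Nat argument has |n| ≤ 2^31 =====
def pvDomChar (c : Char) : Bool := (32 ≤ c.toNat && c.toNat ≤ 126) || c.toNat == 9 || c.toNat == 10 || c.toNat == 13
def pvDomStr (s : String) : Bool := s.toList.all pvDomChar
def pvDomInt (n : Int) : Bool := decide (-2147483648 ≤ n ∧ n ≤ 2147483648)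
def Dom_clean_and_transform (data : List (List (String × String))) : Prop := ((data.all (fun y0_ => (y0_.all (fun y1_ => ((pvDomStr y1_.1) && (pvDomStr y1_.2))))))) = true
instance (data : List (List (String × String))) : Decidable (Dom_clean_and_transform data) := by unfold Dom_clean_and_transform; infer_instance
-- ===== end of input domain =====

-- B replaces A's single accumulating pass with a filter-then-extract decomposition:
-- one pass builds the accepted (title, price, list_price, url) rows with the url already
-- normalized, then four independent passes extract each column (objective: alternative).

-- ===== PORT A =====
-- A's loop body: one step of the fold over the rows, appending to the four columns.
def pvStepA (st : List (Option String) × List (Option String) × List (Option String) × List (Option String))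
    (r : List (String × String)) :
    List (Option String) × List (Option String) × List (Option String) × List (Option String) :=
  let url := (PySem.Dict.mk r).get? "url"
  let title := (PySem.Dict.mk r).get? "title"
  let price := (PySem.Dict.mk r).get? "price"
  let list_price := (PySem.Dict.mk r).get? "list_price"
  match url, title with
  | some u, some t =>
    if u ≠ "" ∧ t ≠ "" then
      let u' := if PySem.Str.startswith u "http" then u
                else String.ofList ("https://www.amazon.com".toList ++ u.toList)
      (st.1 ++ [some t], st.2.1 ++ [price], st.2.2.1 ++ [list_price], st.2.2.2 ++ [some u'])
    else st
  | _, _ => st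

def clean_and_transform (data : List (List (String × String))) : List (String × List (Option String)) :=
  let st := data.foldl pvStepA ([], [], [], [])
  [("title", st.1), ("price", st.2.1), ("list_price", st.2.2.1), ("url", st.2.2.2)]

-- ===== PORT B =====
-- Source B's `_row`: None for a rejected record, else the normalized row tuple.
def pvRow (r : List (String × String)) :
    Option (String × Option String × Option String × String) :=
  match (PySem.Dict.mk r).get? "url", (PySem.Dict.mk r).get? "title" with
  | some u, some t =>
    if u ≠ "" ∧ t ≠ "" then
      some (t, (PySem.Dict.mk r).get? "price", (PySem.Dict.mk r).get? "list_price",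
            if PySem.Str.startswith u "http" then u
            else String.ofList ("https://www.amazon.com".toList ++ u.toList))
    else none
  | _, _ => none

def clean_and_transform_alt (data : List (List (String × String))) : List (String × List (Option String)) :=
  let rows := List.filterMap id (data.map pvRow)
  [("title", rows.map (fun x => some x.1)),
   ("price", rows.map (fun x => x.2.1)),
   ("list_price", rows.map (fun x => x.2.2.1)),
   ("url", rows.map (fun x => some x.2.2.2))]

-- ===== PRECONDITION & SPEC =====
def Spec_clean_and_transform (data : List (List (String × String))) (out : List (String × List (Option String))) : Prop := out = clean_and_transform_alt data
instance (data : List (List (String × String))) (out : List (String × List (Option String))) : Decidable (Spec_clean_and_transform data out) := by unfold Spec_clean_and_transform; infer_instance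

-- ===== CLAIM (what is proved, stated in full; the proofs are below) =====
def Claim_equal_clean_and_transform : Prop := ∀ (data : List (List (String × String))), Dom_clean_and_transform data → Spec_clean_and_transform data (clean_and_transform data)

-- ===== LEMMAS AND PROOFS =====

-- The invariant of A's loop: the fold appends, column by column, exactly the
-- projections of B's accepted-row list.
lemma foldA_eq (data : List (List (String × String)))
    (a b c d : List (Option String)) :
    data.foldl pvStepA (a, b, c, d) =
      (a ++ (List.filterMap id (data.map pvRow)).map (fun x => some x.1),
       b ++ (List.filterMap id (data.map pvRow)).map (fun x => x.2.1),
       c ++ (List.filterMap id (data.map pvRow)).map (fun x => x.2.2.1),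
       d ++ (List.filterMap id (data.map pvRow)).map (fun x => some x.2.2.2)) := by
  induction data generalizing a b c d with
  | nil => simp
  | cons r t ih =>
    simp only [List.foldl_cons, List.map_cons, List.filterMap_cons]
    have hstep : pvStepA (a, b, c, d) r =
        match pvRow r with
        | some x => (a ++ [some x.1], b ++ [x.2.1], c ++ [x.2.2.1], d ++ [some x.2.2.2])
        | none => (a, b, c, d) := by
      unfold pvStepA pvRow
      rcases (PySem.Dict.mk r).get? "url" with _ | u <;>
        rcases (PySem.Dict.mk r).get? "title" with _ | s <;> simp <;> split <;> simp
    rcases hrow : pvRow r with _ | x <;> (simp [hrow] at hstep; rw [hstep, ih]; simp)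

theorem clean_and_transform_spec : Claim_equal_clean_and_transform := by
  intro data _
  unfold Spec_clean_and_transform clean_and_transform clean_and_transform_alt
  rw [foldA_eq]
  simp
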